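-- pv_equiv track=rewrite | github.com/PRIYANKALSHARMA1575/GraminAI | backend/predictor_demo.py | extract_unique_items
-- ===== SOURCE A (Python) =====
-- def extract_unique_items(columns):
--     temp_commodities, temp_states, temp_markets = set(), set(), set()
--     for col in columns:
--         if col.startswith('Commodity_'):
--             temp_commodities.add(col.split('Commodity_', 1)[1])
--         elif col.startswith('State_'):
--             temp_states.add(col.split('State_', 1)[1])
--         elif col.startswith('Market_'):
--             temp_markets.add(col.split('Market_', 1)[1])
--     return sorted(list(temp_commodities)), sorted(list(temp_states)), sorted(list(temp_markets))
-- ===== SOURCE B (Python) =====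
-- def _append_unique(items, item):
--     # input list is fed in sorted order, so equal suffixes arrive adjacently
--     if not items or items[-1] != item:
--         items.append(item)
--
--
-- def extract_unique_items(columns):
--     commodities, states, markets = [], [], []
--     for col in sorted(columns):
--         if col.startswith('Commodity_'):
--             _append_unique(commodities, col[10:])   # 10 == len('Commodity_')
--         elif col.startswith('State_'):
--             _append_unique(states, col[6:])         # 6 == len('State_')
--         elif col.startswith('Market_'):
--             _append_unique(markets, col[7:])        # 7 == len('Market_')
--     return commodities, states, markets
-- ===== Notes on version B (the rewrite author's own statement) =====
-- stated objective: alternative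
-- what changed: Instead of building three sets during the scan and sorting each at the end, B sorts the column list once up front and then makes a single pass that dispatches each column by prefix, strips it, and deduplicates by comparing with the last value appended to that category (equal suffixes are adjacent after the sort), using no sets.
import Mathlib
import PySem

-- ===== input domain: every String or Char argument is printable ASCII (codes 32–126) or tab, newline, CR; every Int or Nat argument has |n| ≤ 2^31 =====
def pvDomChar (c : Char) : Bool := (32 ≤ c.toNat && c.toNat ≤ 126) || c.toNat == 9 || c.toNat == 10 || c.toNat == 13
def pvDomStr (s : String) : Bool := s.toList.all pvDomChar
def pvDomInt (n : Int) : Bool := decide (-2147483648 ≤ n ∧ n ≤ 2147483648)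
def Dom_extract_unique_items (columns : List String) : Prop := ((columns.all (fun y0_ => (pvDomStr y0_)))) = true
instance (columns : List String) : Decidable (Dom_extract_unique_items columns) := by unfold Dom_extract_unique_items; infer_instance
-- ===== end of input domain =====

-- B replaces A's three-sets-then-three-sorts scheme by one sort of the columns followed by a
-- single dispatching pass with adjacent-duplicate suppression; same result, no speed claim.

-- ===== PORT A =====
-- col.split(pre, 1)[1]: under the startswith guard the separator occurs, so index 1 always
-- exists and the getD defaults are unreachable.
def pvStripSplit (col pre : String) : String :=
  (PySem.List.pyGet? ((PySem.Str.splitMax? col pre 1).getD []) 1).getD ""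

def extract_unique_items (columns : List String) : List String × List String × List String :=
  let step := fun (acc : PySem.Set String × PySem.Set String × PySem.Set String) (col : String) =>
    if PySem.Str.startswith col "Commodity_" then
      (PySem.Set.add acc.1 (pvStripSplit col "Commodity_"), acc.2.1, acc.2.2)
    else if PySem.Str.startswith col "State_" then
      (acc.1, PySem.Set.add acc.2.1 (pvStripSplit col "State_"), acc.2.2)
    else if PySem.Str.startswith col "Market_" then
      (acc.1, acc.2.1, PySem.Set.add acc.2.2 (pvStripSplit col "Market_"))
    else acc
  let r := columns.foldl step ([], [], [])
  (PySem.List.sorted r.1 (fun x => x), PySem.List.sorted r.2.1 (fun x => x),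
    PySem.List.sorted r.2.2 (fun x => x))

-- ===== PORT B =====
-- 'if not items or items[-1] != item: items.append(item)'
def pvAppendUnique (items : List String) (item : String) : List String :=
  if items.isEmpty ∨ PySem.List.pyGet? items (-1) ≠ some item then items ++ [item] else items

def extract_unique_items_alt (columns : List String) : List String × List String × List String :=
  let step := fun (acc : List String × List String × List String) (col : String) =>
    if PySem.Str.startswith col "Commodity_" then
      (pvAppendUnique acc.1 (PySem.Str.slice col (some 10) none), acc.2.1, acc.2.2)
    else if PySem.Str.startswith col "State_" then
      (acc.1, pvAppendUnique acc.2.1 (PySem.Str.slice col (some 6) none), acc.2.2)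
    else if PySem.Str.startswith col "Market_" then
      (acc.1, acc.2.1, pvAppendUnique acc.2.2 (PySem.Str.slice col (some 7) none))
    else acc
  (PySem.List.sorted columns (fun x => x)).foldl step ([], [], [])

-- ===== PRECONDITION & SPEC =====
def Spec_extract_unique_items (columns : List String) (out : List String × List String × List String) : Prop := out = extract_unique_items_alt columns
instance (columns : List String) (out : List String × List String × List String) : Decidable (Spec_extract_unique_items columns out) := by unfold Spec_extract_unique_items; infer_instance

-- ===== CLAIM (what is proved, stated in full; the proofs are below) =====
def Claim_equal_extract_unique_items : Prop := ∀ (columns : List String), Dom_extract_unique_items columns → Spec_extract_unique_items columns (extract_unique_items columns)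

-- ===== LEMMAS AND PROOFS =====

-- structural view of B's adjacent-dedup loop: the suffixes emitted after last-emitted value
def pvDD : Option String → List String → List String
  | _, [] => []
  | la, x :: xs => if some x = la then pvDD la xs else x :: pvDD (some x) xs

theorem pvGet_neg_one (l : List String) (h : l ≠ []) :
    PySem.List.pyGet? l (-1) = l.getLast? := by
  have h1 : 1 ≤ l.length := List.length_pos_of_ne_nil h
  simp [PySem.List.pyGet?, PySem.List.pyIdx?, h1, List.getLast?_eq_getElem?]

theorem pvAppendUnique_eq (items : List String) (x : String) :
    pvAppendUnique items x = if items.getLast? = some x then items else items ++ [x] := by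
  by_cases h : items = []
  · subst h; simp [pvAppendUnique]
  · rw [pvAppendUnique, pvGet_neg_one items h]
    by_cases hl : items.getLast? = some x <;> simp [hl, h]

theorem pvFoldl_prod3 {α β1 β2 β3 : Type} (l : List α) (g : β1 × β2 × β3 → α → β1 × β2 × β3)
    (h1 : β1 → α → β1) (h2 : β2 → α → β2) (h3 : β3 → α → β3)
    (hg : ∀ acc x, g acc x = (h1 acc.1 x, h2 acc.2.1 x, h3 acc.2.2 x))
    (a : β1) (b : β2) (c : β3) :
    l.foldl g (a, b, c) = (l.foldl h1 a, l.foldl h2 b, l.foldl h3 c) := by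
  induction l generalizing a b c with
  | nil => rfl
  | cons x xs ih => simp [List.foldl_cons, hg, ih]

theorem pvFoldl_if_filter {α β : Type} (g : α → Bool) (h : β → α → β) (l : List α) (init : β) :
    l.foldl (fun s c => if g c then h s c else s) init = (l.filter g).foldl h init := by
  induction l generalizing init with
  | nil => rfl
  | cons x xs ih => by_cases hx : g x <;> simp [hx, ih]

theorem pvCons_le_cons (c : Char) (u v : List Char) : c :: u ≤ c :: v ↔ u ≤ v := by
  rw [← not_lt, ← not_lt, List.cons_lt_cons_iff]; simp

theorem pvAppend_le_append (p u v : List Char) : p ++ u ≤ p ++ v ↔ u ≤ v := by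
  induction p with
  | nil => simp
  | cons c p ih => rw [List.cons_append, List.cons_append, pvCons_le_cons]; exact ih

theorem pvStrip_mono (p : List Char) (a b : String) (ha : p <+: a.toList)
    (hb : p <+: b.toList) (hab : a ≤ b) :
    String.ofList (a.toList.drop p.length) ≤ String.ofList (b.toList.drop p.length) := by
  obtain ⟨u, hu⟩ := ha
  obtain ⟨v, hv⟩ := hb
  rw [String.le_iff_toList_le] at hab ⊢
  rw [String.toList_ofList, String.toList_ofList, ← hu, ← hv, List.drop_left, List.drop_left]
  rw [← hu, ← hv] at hab
  exact (pvAppend_le_append p u v).1 hab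

theorem pvFoldl_dd (m : List String) : ∀ (acc : List String),
    m.foldl (fun l x => if l.getLast? = some x then l else l ++ [x]) acc
      = acc ++ pvDD acc.getLast? m := by
  induction m with
  | nil => intro acc; simp [pvDD]
  | cons x xs ih =>
    intro acc
    rw [List.foldl_cons]
    by_cases h : acc.getLast? = some x
    · rw [if_pos h, ih acc, h]
      simp [pvDD]
    · rw [if_neg h, ih (acc ++ [x]), List.getLast?_concat]
      have : pvDD acc.getLast? (x :: xs) = x :: pvDD (some x) xs := by
        rw [pvDD]; rw [if_neg (by exact fun hc => h hc.symm)]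
      rw [this, List.append_assoc]
      rfl

theorem pvDD_mem (m : List String) : ∀ (a : String), m.Pairwise (· ≤ ·) →
    (∀ x ∈ m, a ≤ x) → ∀ y, (y ∈ pvDD (some a) m ↔ y ∈ m ∧ y ≠ a) := by
  induction m with
  | nil => intro a _ _ y; simp [pvDD]
  | cons x xs ih =>
    intro a hpw hb y
    rcases List.pairwise_cons.1 hpw with ⟨hx, hpw'⟩
    by_cases h : x = a
    · subst h
      rw [pvDD, if_pos rfl, ih x hpw' hx y]
      constructor
      · rintro ⟨h1, h2⟩; exact ⟨List.mem_cons_of_mem _ h1, h2⟩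
      · rintro ⟨h1, h2⟩
        rcases List.mem_cons.1 h1 with rfl | h1
        · exact absurd rfl h2
        · exact ⟨h1, h2⟩
    · have hax : a ≤ x := hb x List.mem_cons_self
      have hax' : a < x := lt_of_le_of_ne hax (fun e => h e.symm)
      rw [pvDD, if_neg (by simpa using fun e => h e)]
      rw [List.mem_cons, ih x hpw' hx y, List.mem_cons]
      constructor
      · rintro (rfl | ⟨h1, h2⟩)
        · exact ⟨Or.inl rfl, h⟩
        · have hxy : x ≤ y := hx y h1
          exact ⟨Or.inr h1, fun e => absurd (hax'.trans_le hxy) (by simp [e])⟩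
      · rintro ⟨(rfl | h1), h2⟩
        · exact Or.inl rfl
        · by_cases hyx : y = x
          · exact Or.inl hyx
          · exact Or.inr ⟨h1, hyx⟩

theorem pvDD_pair (m : List String) : ∀ (a : String), m.Pairwise (· ≤ ·) →
    (∀ x ∈ m, a ≤ x) →
    ((pvDD (some a) m).Pairwise (· < ·) ∧ ∀ y ∈ pvDD (some a) m, a < y) := by
  induction m with
  | nil => intro a _ _; simp [pvDD]
  | cons x xs ih =>
    intro a hpw hb
    rcases List.pairwise_cons.1 hpw with ⟨hx, hpw'⟩
    by_cases h : x = a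
    · subst h; rw [pvDD, if_pos rfl]; exact ih x hpw' hx
    · have hax' : a < x := lt_of_le_of_ne (hb x List.mem_cons_self) (fun e => h e.symm)
      rw [pvDD, if_neg (by simpa using fun e => h e)]
      rcases ih x hpw' hx with ⟨hp, hgt⟩
      refine ⟨List.pairwise_cons.2 ⟨hgt, hp⟩, ?_⟩
      intro y hy
      rcases List.mem_cons.1 hy with rfl | hy
      · exact hax'
      · exact lt_trans hax' (hgt y hy)

theorem pvDD_none_mem (m : List String) (hpw : m.Pairwise (· ≤ ·)) (y : String) :
    y ∈ pvDD none m ↔ y ∈ m := by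
  cases m with
  | nil => simp [pvDD]
  | cons x xs =>
    rcases List.pairwise_cons.1 hpw with ⟨hx, hpw'⟩
    rw [pvDD, if_neg (by simp), List.mem_cons, List.mem_cons,
      pvDD_mem xs x hpw' hx y]
    by_cases hyx : y = x <;> simp [hyx]

theorem pvDD_none_pair (m : List String) (hpw : m.Pairwise (· ≤ ·)) :
    (pvDD none m).Pairwise (· < ·) := by
  cases m with
  | nil => simp [pvDD]
  | cons x xs =>
    rcases List.pairwise_cons.1 hpw with ⟨hx, hpw'⟩
    rw [pvDD, if_neg (by simp)]
    rcases pvDD_pair xs x hpw' hx with ⟨hp, hgt⟩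
    exact List.pairwise_cons.2 ⟨hgt, hp⟩

theorem pvSorted_set_eq_dd (mA mB : List String) (hperm : mB.Perm mA)
    (hpw : mB.Pairwise (· ≤ ·)) :
    PySem.List.sorted (PySem.Set.ofList mA) (fun x => x) = pvDD none mB := by
  apply PySem.List.sorted_eq_of_perm_of_pairwise_lt
  · rw [List.perm_ext_iff_of_nodup
      ((pvDD_none_pair mB hpw).imp (fun h => ne_of_lt h)) (PySem.Set.nodup_ofList mA)]
    intro y
    rw [pvDD_none_mem mB hpw y, PySem.Set.mem_ofList, hperm.mem_iff]
  · exact pvDD_none_pair mB hpw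

theorem pvGo_m0 (sep : List Char) (fuel : Nat) (l cur : List Char) (acc : List (List Char)) :
    PySem.Chars.splitOnMax.go sep fuel 0 l cur acc = ((cur.reverse ++ l) :: acc).reverse := by
  cases fuel with
  | zero => rfl
  | succ n => cases l with
    | nil => simp [PySem.Chars.splitOnMax.go]
    | cons c rest => simp [PySem.Chars.splitOnMax.go]

theorem pvSplitMax_prefix (s sep : List Char) (hsep : sep ≠ []) (h : sep.isPrefixOf s = true) :
    PySem.Chars.splitMax? s sep 1 = some [[], s.drop sep.length] := by
  have hs : s ≠ [] := by
    intro e; subst e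
    rcases List.isPrefixOf_iff_prefix.1 h with h'
    exact hsep (List.prefix_nil.1 h')
  rw [PySem.Chars.splitMax?, if_neg (by simpa using hsep)]
  congr 1
  rw [PySem.Chars.splitOnMax, if_neg (by norm_num)]
  cases s with
  | nil => exact absurd rfl hs
  | cons c rest =>
    rw [show ((c :: rest).length + 1) = (c :: rest).length + 1 from rfl]
    simp only [PySem.Chars.splitOnMax.go, h]
    norm_num
    rw [pvGo_m0]
    simp

theorem pvStripSplit_eq (c pre : String) (hpre : pre.toList ≠ [])
    (h : PySem.Str.startswith c pre = true) :
    pvStripSplit c pre = String.ofList (c.toList.drop pre.toList.length) := by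
  have h' : pre.toList.isPrefixOf c.toList = true := by
    simpa [PySem.Str.startswith, PySem.Chars.startswith] using h
  rw [pvStripSplit, PySem.Str.splitMax?, pvSplitMax_prefix c.toList pre.toList hpre h']
  simp [PySem.List.pyGet?, PySem.List.pyIdx?]

theorem pvSlice_nat (c : String) (n : Nat) :
    PySem.Str.slice c (some (n : Int)) none = String.ofList (c.toList.drop n) := by
  rw [PySem.Str.slice]
  congr 1
  rw [PySem.Chars.slice, PySem.List.slice_from c.toList (by positivity : (0:Int) ≤ (n:Int))]
  simp

-- one category, generically: A's filter-into-set-then-sort equals B's sort-then-adjacent-dedup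
theorem pvComp_eq (g : String → Bool) (p : List Char)
    (hg : ∀ c : String, g c = true → p <+: c.toList)
    (eA eB : String → String)
    (hA : ∀ c, g c = true → eA c = String.ofList (c.toList.drop p.length))
    (hB : ∀ c, eB c = String.ofList (c.toList.drop p.length))
    (cols : List String) :
    PySem.List.sorted (cols.foldl (fun s c => if g c then PySem.Set.add s (eA c) else s) []) (fun x => x)
      = (PySem.List.sorted cols (fun x => x)).foldl
          (fun l c => if g c then pvAppendUnique l (eB c) else l) [] := by
  classical
  set f : String → String := fun c => String.ofList (c.toList.drop p.length) with hf
  have hAside :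
      cols.foldl (fun s c => if g c then PySem.Set.add s (eA c) else s) []
        = PySem.Set.ofList ((cols.filter g).map f) := by
    rw [pvFoldl_if_filter]
    rw [PySem.List.foldl_congr_mem (cols.filter g) _ (fun s c => PySem.Set.add s (f c)) []
      (by intro acc x hx; rw [hA x (List.mem_filter.1 hx).2])]
    rw [← List.foldl_map, ← PySem.Set.ofList_eq_foldl]
  have hBside :
      (PySem.List.sorted cols (fun x => x)).foldl
          (fun l c => if g c then pvAppendUnique l (eB c) else l) []
        = pvDD none (((PySem.List.sorted cols (fun x => x)).filter g).map f) := by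
    rw [pvFoldl_if_filter]
    rw [PySem.List.foldl_congr_mem ((PySem.List.sorted cols (fun x => x)).filter g) _
      (fun l c => if l.getLast? = some (f c) then l else l ++ [f c]) []
      (by intro acc x _; rw [hB, pvAppendUnique_eq])]
    rw [← List.foldl_map (f := f)
      (g := fun l x => if l.getLast? = some x then l else l ++ [x]), pvFoldl_dd]
    simp
  rw [hAside, hBside]
  apply pvSorted_set_eq_dd
  · exact ((PySem.List.sorted_perm cols (fun x => x) false).filter g).map f
  · apply List.pairwise_map.2
    apply List.Pairwise.imp_of_mem ?_
      ((PySem.List.sorted_pairwise cols (fun x => x)).filter g)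
    intro a b ha hb hab
    exact pvStrip_mono p a b (hg a (List.mem_filter.1 ha).2) (hg b (List.mem_filter.1 hb).2) hab

theorem pvPrefix_of_startswith (c p : String) (h : PySem.Str.startswith c p = true) :
    p.toList <+: c.toList := by
  rw [PySem.Str.startswith, PySem.Chars.startswith] at h
  exact List.isPrefixOf_iff_prefix.1 h

-- ===== VERDICT (by name: the statement is the Claim_ definition above) =====
theorem extract_unique_items_spec : Claim_equal_extract_unique_items := by
  intro columns _
  unfold Spec_extract_unique_items extract_unique_items extract_unique_items_alt
  dsimp only
  rw [pvFoldl_prod3 columns _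
    (fun s c => if PySem.Str.startswith c "Commodity_" then
      PySem.Set.add s (pvStripSplit c "Commodity_") else s)
    (fun s c => if !PySem.Str.startswith c "Commodity_" && PySem.Str.startswith c "State_" then
      PySem.Set.add s (pvStripSplit c "State_") else s)
    (fun s c => if !PySem.Str.startswith c "Commodity_" && (!PySem.Str.startswith c "State_"
        && PySem.Str.startswith c "Market_") then
      PySem.Set.add s (pvStripSplit c "Market_") else s)
    (by
      intro acc col
      by_cases h1 : PySem.Str.startswith col "Commodity_" <;>
        by_cases h2 : PySem.Str.startswith col "State_" <;>
          by_cases h3 : PySem.Str.startswith col "Market_" <;>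
            simp [h1, h2, h3, -PySem.Str.startswith_eq])]
  rw [pvFoldl_prod3 (PySem.List.sorted columns (fun x => x)) _
    (fun l c => if PySem.Str.startswith c "Commodity_" then
      pvAppendUnique l (PySem.Str.slice c (some 10) none) else l)
    (fun l c => if !PySem.Str.startswith c "Commodity_" && PySem.Str.startswith c "State_" then
      pvAppendUnique l (PySem.Str.slice c (some 6) none) else l)
    (fun l c => if !PySem.Str.startswith c "Commodity_" && (!PySem.Str.startswith c "State_"
        && PySem.Str.startswith c "Market_") then
      pvAppendUnique l (PySem.Str.slice c (some 7) none) else l)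
    (by
      intro acc col
      by_cases h1 : PySem.Str.startswith col "Commodity_" <;>
        by_cases h2 : PySem.Str.startswith col "State_" <;>
          by_cases h3 : PySem.Str.startswith col "Market_" <;>
            simp [h1, h2, h3, -PySem.Str.startswith_eq])]
  simp only [Prod.mk.injEq]
  refine ⟨?_, ?_, ?_⟩
  · exact pvComp_eq _ ("Commodity_".toList)
      (fun c h => pvPrefix_of_startswith c _ h)
      _ _
      (fun c h => pvStripSplit_eq c _ (by decide) h)
      (fun c => by
        rw [show (10 : Int) = ((10 : Nat) : Int) by norm_num, pvSlice_nat]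
        norm_num [show ("Commodity_".toList.length) = 10 from by decide])
      columns
  · exact pvComp_eq _ ("State_".toList)
      (fun c h => pvPrefix_of_startswith c _ (by
        rcases Bool.and_eq_true_iff.1 h with ⟨_, h2⟩; exact h2))
      _ _
      (fun c h => pvStripSplit_eq c _ (by decide) (by
        rcases Bool.and_eq_true_iff.1 h with ⟨_, h2⟩; exact h2))
      (fun c => by
        rw [show (6 : Int) = ((6 : Nat) : Int) by norm_num, pvSlice_nat]
        norm_num [show ("State_".toList.length) = 6 from by decide])
      columns
  · exact pvComp_eq _ ("Market_".toList)
      (fun c h => pvPrefix_of_startswith c _ (by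
        rcases Bool.and_eq_true_iff.1 h with ⟨_, h2⟩
        rcases Bool.and_eq_true_iff.1 h2 with ⟨_, h3⟩; exact h3))
      _ _
      (fun c h => pvStripSplit_eq c _ (by decide) (by
        rcases Bool.and_eq_true_iff.1 h with ⟨_, h2⟩
        rcases Bool.and_eq_true_iff.1 h2 with ⟨_, h3⟩; exact h3))
      (fun c => by
        rw [show (7 : Int) = ((7 : Nat) : Int) by norm_num, pvSlice_nat]
        norm_num [show ("Market_".toList.length) = 7 from by decide])
      columns
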